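-- pv_equiv track=rewrite | github.com/bsquiroz/learn_with_exercises | 03_bucles/10_onlyVocals/main.py | amountVocals
-- ===== SOURCE A (Python) =====
-- def amountVocals(phrase):
--     phrase = phrase.lower()
--     result = ''
--
--     for char in phrase:
--         if char in 'aeiou':
--             result += char
--         elif char == ' ':
--             result += ' '
--         else:
--             result += '_'
--
--     return result
-- ===== SOURCE B (Python) =====
-- import re
--
-- def amountVocals(phrase):
--     return re.sub(r'[^aeiou ]', '_', phrase.lower())
-- ===== Notes on version B (the rewrite author's own statement) =====
-- stated objective: idiomatic
-- what changed: Replaces the explicit char-by-char loop with string concatenation and three-way if/elif/else by a single regex complement-class substitution over the lowered string.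
import Mathlib
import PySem

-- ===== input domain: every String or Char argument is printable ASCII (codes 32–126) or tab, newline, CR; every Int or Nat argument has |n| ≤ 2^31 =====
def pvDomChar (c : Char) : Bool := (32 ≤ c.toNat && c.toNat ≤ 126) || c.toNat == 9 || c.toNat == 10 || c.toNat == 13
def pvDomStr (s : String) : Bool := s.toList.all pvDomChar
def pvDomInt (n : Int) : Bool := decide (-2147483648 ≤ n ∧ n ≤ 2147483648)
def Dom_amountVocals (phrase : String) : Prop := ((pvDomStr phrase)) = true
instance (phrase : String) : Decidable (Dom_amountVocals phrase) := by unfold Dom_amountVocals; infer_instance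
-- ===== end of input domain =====

-- B: single complement-class substitution (regex in Python) over the lowered string, instead of A's char loop with if/elif/else.


-- ===== PORT A =====
def amountVocals (phrase : String) : String :=
  let phrase := PySem.Str.lower phrase
  let result : List Char :=
    phrase.toList.foldl
      (fun r char =>
        if "aeiou".toList.contains char then r ++ [char]
        else if char = ' ' then r ++ [' ']
        else r ++ ['_']) []
  String.ofList result

-- ===== PORT B =====
-- re.sub(r'[^aeiou ]', '_', phrase.lower()): replace every char outside the class "aeiou " by '_'
def amountVocals_alt (phrase : String) : String :=
  String.ofList (((PySem.Str.lower phrase).toList).map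
    (fun c => if "aeiou ".toList.contains c then c else '_'))

-- ===== PRECONDITION & SPEC =====
def Spec_amountVocals (phrase : String) (out : String) : Prop := out = amountVocals_alt phrase
instance (phrase : String) (out : String) : Decidable (Spec_amountVocals phrase out) := by unfold Spec_amountVocals; infer_instance

-- ===== CLAIM (what is proved, stated in full; the proofs are below) =====
def Claim_equal_amountVocals : Prop := ∀ (phrase : String), Dom_amountVocals phrase → Spec_amountVocals phrase (amountVocals phrase)

-- ===== LEMMAS AND PROOFS =====

-- ===== VERDICT (by name: the statement is the Claim_ definition above) =====
theorem step_char (c : Char) (r : List Char) :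
    (if "aeiou".toList.contains c then r ++ [c]
     else if c = ' ' then r ++ [' '] else r ++ ['_'])
    = r ++ [if "aeiou ".toList.contains c then c else '_'] := by
  by_cases h : c = 'a' ∨ c = 'e' ∨ c = 'i' ∨ c = 'o' ∨ c = 'u'
  · rcases h with h|h|h|h|h <;> subst h <;> rfl
  · push Not at h
    obtain ⟨h1, h2, h3, h4, h5⟩ := h
    by_cases hs : c = ' '
    · subst hs; rfl
    · simp [h1, h2, h3, h4, h5, hs]

theorem foldl_glyph (l : List Char) (acc : List Char) :
    l.foldl
      (fun r char =>
        if "aeiou".toList.contains char then r ++ [char]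
        else if char = ' ' then r ++ [' ']
        else r ++ ['_']) acc
    = acc ++ l.map (fun c => if "aeiou ".toList.contains c then c else '_') := by
  induction l generalizing acc with
  | nil => simp
  | cons c t ih =>
    rw [List.foldl_cons, ih, step_char, List.map_cons]
    simp

theorem amountVocals_spec : Claim_equal_amountVocals := by
  intro phrase _
  unfold Spec_amountVocals amountVocals amountVocals_alt
  show String.ofList _ = _
  rw [foldl_glyph]
  simp
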